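-- pv_equiv track=rewrite | github.com/williamwbush/codewars | solved_6_kyu/divisibility_by_13.py | thirt
-- ===== SOURCE A (Python) =====
-- def thirt(n):
--     sequence = [1, 10, 9, 12, 3, 4]
--     sum1, sum2 = -1, -1
--
--     while True:
--         n = [int(i) for i in list(str(n))]
--         sum2 = sum(sequence[(len(n) - 1 - i) % 6] * n[i] for i in range(len(n)))
--         if sum2 == sum1:
--             return sum2
--         sum1 = sum2
--         n = sum2
-- ===== SOURCE B (Python) =====
-- def thirt(n):
--     # 10**6 == 1 (mod 13), so the six weights repeat with period 6: the weighted
--     # digit sum of n is the sum of the weighted sums of its 6-digit blocks.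
--     total, m = 0, n
--     while m:
--         m, b = divmod(m, 1000000)
--         total += (b % 10 + 10 * (b // 10 % 10) + 9 * (b // 100 % 10)
--                   + 12 * (b // 1000 % 10) + 3 * (b // 10000 % 10)
--                   + 4 * (b // 100000 % 10))
--     return total if total == n else thirt(total)
-- ===== Notes on version B (the rewrite author's own statement) =====
-- stated objective: alternative
-- what changed: B exploits 10^6 = 1 (mod 13): instead of converting n to a string and weighting each character by (len-1-i)%6, it splits the number into 6-digit blocks with divmod(m, 10**6) and adds an unrolled fixed dot product per block, and the sum1/sum2 while-True fixed-point loop is replaced by direct recursion on the new sum.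
import Mathlib
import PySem

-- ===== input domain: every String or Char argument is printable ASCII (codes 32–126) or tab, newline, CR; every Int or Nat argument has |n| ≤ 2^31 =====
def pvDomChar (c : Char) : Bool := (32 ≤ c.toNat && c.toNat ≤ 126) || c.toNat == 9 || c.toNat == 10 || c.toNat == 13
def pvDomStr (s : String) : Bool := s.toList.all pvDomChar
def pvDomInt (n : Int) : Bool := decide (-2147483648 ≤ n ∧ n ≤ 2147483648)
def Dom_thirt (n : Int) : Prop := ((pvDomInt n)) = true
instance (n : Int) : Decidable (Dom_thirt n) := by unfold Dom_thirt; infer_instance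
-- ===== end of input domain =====

-- B uses 10^6 ≡ 1 (mod 13): it consumes 6-digit blocks (divmod by 10^6) with an unrolled
-- weight dot product per block, and recurses on the new sum instead of A's sum1/sum2 loop.
-- Both ports carry fuel guards that only make the recursion structural; A raises ValueError
-- on negative n (and B's loop would not terminate there), so Pre_ restricts to 0 ≤ n.

-- the weights table of A
def pySeq : List Int := [1, 10, 9, 12, 3, 4]

-- ===== PORT A =====
-- A-side helpers: parse of one character, as A's int(i) (total form; Pre_ excludes ValueError)
def pvChar (c : Char) : Int := (PySem.Int.ofChars? [c]).getD 0

-- A's weighted sum: sum(sequence[(len(n)-1-i)%6] * n[i] for i in range(len(n)))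
def wsumA (n : Int) : Int :=
  let ds := (PySem.Int.toChars n).map pvChar
  (((PySem.List.pyRange 0 (PySem.List.len ds) 1).map (fun i =>
    PySem.List.pyGetD pySeq (PySem.Int.mod (PySem.List.len ds - 1 - i) 6) 0 *
      PySem.List.pyGetD ds i 0)).sum)

-- while True: recompute sum2 = wsumA n; return when stable (fuel only guards totality)
def thirtGo (fuel : Nat) (n sum1 : Int) : Int :=
  match fuel with
  | 0 => sum1
  | f + 1 =>
    let sum2 := wsumA n
    if sum2 = sum1 then sum2 else thirtGo f sum2 sum2

def thirt (n : Int) : Int := thirtGo (n.natAbs + 2) n (-1)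

-- ===== PORT B =====
-- B's while loop: m, b = divmod(m, 10**6); total += unrolled dot product of b's six digits
-- (divmod ported as floordiv + mod, exact for the nonzero literal divisor; fuel guards totality)
def blockLoop (fuel : Nat) (m total : Int) : Int :=
  match fuel with
  | 0 => total
  | f + 1 =>
    if m ≠ 0 then
      let b := PySem.Int.mod m 1000000
      blockLoop f (PySem.Int.floordiv m 1000000)
        (total + (PySem.Int.mod b 10
          + 10 * PySem.Int.mod (PySem.Int.floordiv b 10) 10
          + 9 * PySem.Int.mod (PySem.Int.floordiv b 100) 10
          + 12 * PySem.Int.mod (PySem.Int.floordiv b 1000) 10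
          + 3 * PySem.Int.mod (PySem.Int.floordiv b 10000) 10
          + 4 * PySem.Int.mod (PySem.Int.floordiv b 100000) 10))
    else total

-- B's body: total = block sum; return total if total == n else thirt(total) (fuel = guard)
def altGo (fuel : Nat) (n : Int) : Int :=
  match fuel with
  | 0 => 0
  | f + 1 =>
    let total := blockLoop (n.natAbs + 1) n 0
    if total = n then total else altGo f total

def thirt_alt (n : Int) : Int := altGo (n.natAbs + 2) n

-- ===== PRECONDITION & SPEC =====
-- Pre_ excludes negative n, on which A raises ValueError (int('-') while parsing str(n))
def Pre_thirt (n : Int) : Prop := 0 ≤ n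
instance (n : Int) : Decidable (Pre_thirt n) := by unfold Pre_thirt; infer_instance
def pvWitness_thirt : Int := (5)

def Spec_thirt (n : Int) (out : Int) : Prop := out = thirt_alt n
instance (n : Int) (out : Int) : Decidable (Spec_thirt n out) := by unfold Spec_thirt; infer_instance

-- ===== CLAIM (what is proved, stated in full; the proofs are below) =====
def Claim_equal_thirt : Prop := ∀ (n : Int), Dom_thirt n → Pre_thirt n → Spec_thirt n (thirt n)

-- ===== LEMMAS AND PROOFS =====

-- weight for the digit at position k from the right
def sAt (k : Nat) : Int := pySeq.getD (k % 6) 0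

-- reference weighted digit sum of a natural number, digits from the right starting at weight index k
def V (m k : Nat) : Int :=
  if _h : m < 10 then sAt k * (m : Int)
  else sAt k * ((m % 10 : Nat) : Int) + V (m / 10) (k + 1)
  decreasing_by exact Nat.div_lt_self (by omega) (by omega)

theorem sAt_bounds (k : Nat) : 1 ≤ sAt k ∧ sAt k ≤ 12 := by
  unfold sAt
  have h : k % 6 < 6 := Nat.mod_lt k (by omega)
  interval_cases (k % 6) <;> simp [pySeq]

theorem V_nonneg (m k : Nat) : 0 ≤ V m k := by
  induction m using Nat.strong_induction_on generalizing k with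
  | _ m ih =>
    unfold V
    have hs := sAt_bounds k
    split
    · exact mul_nonneg (by omega) (by positivity)
    · have h1 : (0:Int) ≤ sAt k * ((m % 10 : Nat) : Int) := mul_nonneg (by omega) (by positivity)
      have h2 := ih (m / 10) (Nat.div_lt_self (by omega) (by omega)) (k + 1)
      omega

theorem V_step (m k : Nat) : V m k = sAt k * ((m % 10 : Nat) : Int) + V (m / 10) (k + 1) := by
  conv_lhs => rw [V]
  split
  · next h =>
    have h1 : m % 10 = m := Nat.mod_eq_of_lt h
    have h2 : m / 10 = 0 := Nat.div_eq_of_lt h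
    rw [h1, h2, V]
    simp
  · rfl

theorem V_small (m k : Nat) (h : m < 10) : V m k = sAt k * (m : Int) := by
  unfold V; simp [h]

-- Nat.toDigits written as structural recursion over the digits
def myDig (m : Nat) : List Char :=
  if _h : m < 10 then [Nat.digitChar m]
  else myDig (m / 10) ++ [Nat.digitChar (m % 10)]
  decreasing_by exact Nat.div_lt_self (by omega) (by omega)

theorem toDigitsCore_eq (f : Nat) : ∀ n ds, n ≤ f →
    Nat.toDigitsCore 10 (f + 1) n ds = myDig n ++ ds := by
  induction f with
  | zero =>
    intro n ds hn
    have : n = 0 := by omega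
    subst this
    simp [Nat.toDigitsCore, myDig]
  | succ f ih =>
    intro n ds hn
    rw [Nat.toDigitsCore]
    by_cases h : n / 10 = 0
    · have hlt : n < 10 := by omega
      rw [myDig]
      simp [h, hlt, Nat.mod_eq_of_lt hlt]
    · have h10 : 10 ≤ n := by by_contra hc; exact h (Nat.div_eq_of_lt (by omega))
      have hlt : n / 10 ≤ f := by
        have := Nat.div_lt_self (by omega : 0 < n) (by omega : 1 < 10)
        omega
      simp only [h, if_false]
      rw [ih (n / 10) (Nat.digitChar (n % 10) :: ds) hlt]
      conv_rhs => rw [myDig]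
      simp [Nat.not_lt.mpr h10]

theorem toDigits_eq_myDig (m : Nat) : Nat.toDigits 10 m = myDig m := by
  have := toDigitsCore_eq m m [] (le_refl m)
  simpa [Nat.toDigits] using this

theorem pvChar_digitChar (d : Nat) (h : d < 10) : pvChar (Nat.digitChar d) = (d : Int) := by
  interval_cases d <;> decide

-- A's sum with Nat indexing
def SAnat (ds : List Int) : Int :=
  ((List.range ds.length).map (fun i => pySeq.getD ((ds.length - 1 - i) % 6) 0 * ds.getD i 0)).sum

-- weighted sum from the left of a (reversed) digit list, starting at weight index k
def WR : List Int → Nat → Int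
  | [], _ => 0
  | d :: t, k => sAt k * d + WR t (k + 1)

theorem WR_append (l1 l2 : List Int) : ∀ k, WR (l1 ++ l2) k = WR l1 k + WR l2 (k + l1.length) := by
  induction l1 with
  | nil => intro k; simp [WR]
  | cons d t ih =>
    intro k
    simp only [List.cons_append, WR, ih (k + 1), List.length_cons]
    have h1 : k + 1 + t.length = k + (t.length + 1) := by omega
    rw [h1]
    ring

theorem SAnat_cons (d : Int) (t : List Int) :
    SAnat (d :: t) = sAt t.length * d + SAnat t := by
  unfold SAnat
  simp only [List.length_cons]
  rw [List.range_succ_eq_map]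
  simp only [List.map_cons, List.map_map, List.sum_cons]
  congr 1
  apply congrArg
  apply List.map_congr_left
  intro j hj
  show pySeq.getD ((t.length + 1 - 1 - (j + 1)) % 6) 0 * (d :: t).getD (j + 1) 0 =
    pySeq.getD ((t.length - 1 - j) % 6) 0 * t.getD j 0
  have h1 : t.length + 1 - 1 - (j + 1) = t.length - 1 - j := by omega
  rw [h1]
  simp

theorem SAnat_eq_WR (ds : List Int) : SAnat ds = WR ds.reverse 0 := by
  induction ds with
  | nil => simp [SAnat, WR]
  | cons d t ih =>
    rw [SAnat_cons, ih]
    simp only [List.reverse_cons]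
    rw [WR_append]
    simp [WR, List.length_reverse]
    ring

-- digit values of m, most significant first
def dsOf (m : Nat) : List Int := (myDig m).map pvChar

theorem dsOf_eq (m : Nat) : dsOf m =
    if m < 10 then [(m : Int)] else dsOf (m / 10) ++ [((m % 10 : Nat) : Int)] := by
  unfold dsOf
  rw [myDig]
  split
  · next h => simp [pvChar_digitChar m h]
  · next h =>
    simp [pvChar_digitChar (m % 10) (Nat.mod_lt _ (by omega))]

theorem WR_dsOf (m : Nat) : ∀ k, WR (dsOf m).reverse k = V m k := by
  induction m using Nat.strong_induction_on with
  | _ m ih =>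
    intro k
    rw [dsOf_eq]
    by_cases h : m < 10
    · simp only [h, if_true]
      rw [V_small m k h]
      simp [WR]
    · simp only [h, if_false]
      rw [V_step]
      simp only [List.reverse_append, List.reverse_cons, List.reverse_nil, List.nil_append,
        List.cons_append, WR]
      rw [ih (m / 10) (Nat.div_lt_self (by omega) (by omega)) (k + 1)]

theorem SAnat_dsOf (m : Nat) : SAnat (dsOf m) = V m 0 := by
  rw [SAnat_eq_WR, WR_dsOf]

-- the bridge: A's PySem comprehension sum over any Int list equals SAnat
theorem wsumA_pysem (ds : List Int) :
    (((PySem.List.pyRange 0 (PySem.List.len ds) 1).map (fun i =>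
      PySem.List.pyGetD pySeq (PySem.Int.mod (PySem.List.len ds - 1 - i) 6) 0 *
        PySem.List.pyGetD ds i 0)).sum) = SAnat ds := by
  rw [PySem.List.len_eq, PySem.List.pyRange_zero_natCast]
  unfold SAnat
  rw [List.map_map]
  apply congrArg
  apply List.map_congr_left
  intro j hj
  have hj' : j < ds.length := List.mem_range.mp hj
  simp only [Function.comp]
  have hcast : (ds.length : Int) - 1 - (j : Int) = ((ds.length - 1 - j : Nat) : Int) := by
    omega
  have c6 : (6 : Int) = ((6 : Nat) : Int) := by norm_num
  rw [hcast, c6, PySem.Int.mod_natCast, PySem.List.pyGetD_natCast, PySem.List.pyGetD_natCast]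

theorem wsumA_eq (n : Int) : wsumA n = V n.natAbs 0 := by
  unfold wsumA
  rw [wsumA_pysem]
  by_cases h : n < 0
  · have : PySem.Int.toChars n = '-' :: Nat.toDigits 10 n.natAbs := by
      simp [PySem.Int.toChars, h]
    rw [this]
    simp only [List.map_cons]
    rw [toDigits_eq_myDig]
    have hdash : pvChar '-' = 0 := by decide
    rw [hdash]
    show SAnat (0 :: dsOf n.natAbs) = V n.natAbs 0
    rw [SAnat_cons, SAnat_dsOf]
    ring
  · have hnn : ¬ n < 0 := h
    have : PySem.Int.toChars n = Nat.toDigits 10 n.toNat := by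
      simp [PySem.Int.toChars, hnn]
    rw [this, toDigits_eq_myDig]
    have : n.toNat = n.natAbs := by omega
    rw [this]
    exact SAnat_dsOf n.natAbs

-- ===== B-side lemmas: period-6 shift, block decomposition, strict decrease =====

theorem sAt_shift6 (k : Nat) : sAt (k + 6) = sAt k := by
  unfold sAt
  rw [Nat.add_mod_right]

theorem V_shift6 (m : Nat) : ∀ k, V m (k + 6) = V m k := by
  induction m using Nat.strong_induction_on with
  | _ m ih =>
    intro k
    by_cases h : m < 10
    · rw [V_small m _ h, V_small m k h, sAt_shift6]
    · rw [V_step m (k + 6), V_step m k, sAt_shift6]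
      have := ih (m / 10) (Nat.div_lt_self (by omega) (by omega)) (k + 1)
      rw [show k + 6 + 1 = k + 1 + 6 by omega, this]

-- the unrolled per-block dot product, in Nat
def D6N (b : Nat) : Nat :=
  b % 10 + 10 * (b / 10 % 10) + 9 * (b / 100 % 10) + 12 * (b / 1000 % 10)
    + 3 * (b / 10000 % 10) + 4 * (b / 100000 % 10)

theorem V_block (m : Nat) : V m 0 = (D6N (m % 1000000) : Int) + V (m / 1000000) 0 := by
  have e0 := V_step m 0
  have e1 := V_step (m / 10) 1
  have e2 := V_step (m / 100) 2
  have e3 := V_step (m / 1000) 3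
  have e4 := V_step (m / 10000) 4
  have e5 := V_step (m / 100000) 5
  simp only [show m / 10 / 10 = m / 100 by rw [Nat.div_div_eq_div_mul],
    show m / 100 / 10 = m / 1000 by rw [Nat.div_div_eq_div_mul],
    show m / 1000 / 10 = m / 10000 by rw [Nat.div_div_eq_div_mul],
    show m / 10000 / 10 = m / 100000 by rw [Nat.div_div_eq_div_mul],
    show m / 100000 / 10 = m / 1000000 by rw [Nat.div_div_eq_div_mul]] at e0 e1 e2 e3 e4 e5
  have hsh : V (m / 1000000) 6 = V (m / 1000000) 0 := V_shift6 (m / 1000000) 0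
  rw [e0, e1, e2, e3, e4, e5, hsh]
  have h0 : sAt 0 = 1 := by decide
  have h1 : sAt 1 = 10 := by decide
  have h2 : sAt 2 = 9 := by decide
  have h3 : sAt 3 = 12 := by decide
  have h4 : sAt 4 = 3 := by decide
  have h5 : sAt 5 = 4 := by decide
  rw [h0, h1, h2, h3, h4, h5]
  have d0 : m % 1000000 % 10 = m % 10 := by omega
  have d1 : m % 1000000 / 10 % 10 = m / 10 % 10 := by omega
  have d2 : m % 1000000 / 100 % 10 = m / 100 % 10 := by omega
  have d3 : m % 1000000 / 1000 % 10 = m / 1000 % 10 := by omega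
  have d4 : m % 1000000 / 10000 % 10 = m / 10000 % 10 := by omega
  have d5 : m % 1000000 / 100000 % 10 = m / 100000 % 10 := by omega
  unfold D6N
  rw [d0, d1, d2, d3, d4, d5]
  push_cast
  ring

-- values below 100 are exactly the fixed points of the weighted sum
theorem V_fix_small (m : Nat) (h : m < 100) : V m 0 = (m : Int) := by
  rw [V_step m 0, V_step (m / 10) 1]
  have hd : m / 10 / 10 = 0 := by omega
  rw [hd, V_small 0 2 (by omega)]
  have h0 : sAt 0 = 1 := by decide
  have h1 : sAt 1 = 10 := by decide
  rw [h0, h1]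
  have : m / 10 % 10 = m / 10 := by omega
  rw [this]
  push_cast
  omega

theorem D6N_le (b : Nat) : D6N b ≤ 351 := by
  unfold D6N
  have h0 : b % 10 ≤ 9 := by omega
  have h1 : b / 10 % 10 ≤ 9 := by omega
  have h2 : b / 100 % 10 ≤ 9 := by omega
  have h3 : b / 1000 % 10 ≤ 9 := by omega
  have h4 : b / 10000 % 10 ≤ 9 := by omega
  have h5 : b / 100000 % 10 ≤ 9 := by omega
  omega

theorem V_lt (m : Nat) : 100 ≤ m → V m 0 < (m : Int) := by
  induction m using Nat.strong_induction_on with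
  | _ m ih =>
    intro h100
    rw [V_block m]
    by_cases hbig : m < 1000000
    · have hq : m / 1000000 = 0 := by omega
      rw [hq, V_small 0 0 (by omega)]
      unfold D6N
      have hm : m % 1000000 = m := by omega
      rw [hm]
      have : m % 10 + 10 * (m / 10 % 10) + 9 * (m / 100 % 10) + 12 * (m / 1000 % 10)
          + 3 * (m / 10000 % 10) + 4 * (m / 100000 % 10) < m := by omega
      push_cast
      omega
    · have hq1 : 1 ≤ m / 1000000 := by omega
      have hqm : m / 1000000 < m := Nat.div_lt_self (by omega) (by omega)
      have hb := D6N_le (m % 1000000)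
      have hrep : m / 1000000 * 1000000 + m % 1000000 = m := Nat.div_add_mod' m 1000000
      by_cases hq : m / 1000000 < 100
      · rw [V_fix_small (m / 1000000) hq]
        omega
      · have := ih (m / 1000000) hqm (by omega)
        omega

theorem V_ne_lt (m : Nat) (h : V m 0 ≠ (m : Int)) : V m 0 < (m : Int) := by
  by_cases h100 : m < 100
  · exact absurd (V_fix_small m h100) h
  · exact V_lt m (by omega)

-- B's block loop computes V
theorem blockLoop_eq (f : Nat) : ∀ (m : Nat) (t : Int), m < f →
    blockLoop f (m : Int) t = t + V m 0 := by
  induction f with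
  | zero => intro m t h; omega
  | succ f ih =>
    intro m t hm
    by_cases h : m = 0
    · subst h
      show (if (0 : Int) ≠ 0 then _ else t) = t + V 0 0
      rw [if_neg (by simp), V_small 0 0 (by omega)]
      simp
    · have hne : (m : Int) ≠ 0 := by exact_mod_cast h
      show (if (m : Int) ≠ 0 then
          blockLoop f (PySem.Int.floordiv (m : Int) 1000000)
            (t + (PySem.Int.mod (PySem.Int.mod (m : Int) 1000000) 10
              + 10 * PySem.Int.mod (PySem.Int.floordiv (PySem.Int.mod (m : Int) 1000000) 10) 10
              + 9 * PySem.Int.mod (PySem.Int.floordiv (PySem.Int.mod (m : Int) 1000000) 100) 10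
              + 12 * PySem.Int.mod (PySem.Int.floordiv (PySem.Int.mod (m : Int) 1000000) 1000) 10
              + 3 * PySem.Int.mod (PySem.Int.floordiv (PySem.Int.mod (m : Int) 1000000) 10000) 10
              + 4 * PySem.Int.mod (PySem.Int.floordiv (PySem.Int.mod (m : Int) 1000000) 100000) 10))
        else t) = t + V m 0
      rw [if_pos hne]
      have cM : (1000000 : Int) = ((1000000 : Nat) : Int) := by norm_num
      have c10 : (10 : Int) = ((10 : Nat) : Int) := by norm_num
      have c100 : (100 : Int) = ((100 : Nat) : Int) := by norm_num
      have c1000 : (1000 : Int) = ((1000 : Nat) : Int) := by norm_num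
      have c10000 : (10000 : Int) = ((10000 : Nat) : Int) := by norm_num
      have c100000 : (100000 : Int) = ((100000 : Nat) : Int) := by norm_num
      rw [cM, c10, c100, c1000, c10000, c100000]
      rw [PySem.Int.mod_natCast, PySem.Int.floordiv_natCast]
      rw [PySem.Int.floordiv_natCast, PySem.Int.floordiv_natCast, PySem.Int.floordiv_natCast,
        PySem.Int.floordiv_natCast, PySem.Int.floordiv_natCast]
      rw [PySem.Int.mod_natCast, PySem.Int.mod_natCast, PySem.Int.mod_natCast,
        PySem.Int.mod_natCast, PySem.Int.mod_natCast, PySem.Int.mod_natCast]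
      have hlt : m / 1000000 < f := by
        have := Nat.div_lt_self (by omega : 0 < m) (by omega : 1 < 1000000)
        omega
      rw [ih (m / 1000000) _ hlt]
      rw [V_block m]
      unfold D6N
      push_cast
      ring

-- the two fixed-point loops agree, given enough fuel and equal running values
theorem go_eq (f : Nat) : ∀ (m : Nat), m < f →
    thirtGo f (m : Int) (m : Int) = altGo f (m : Int) := by
  induction f with
  | zero => intro m h; omega
  | succ f ih =>
    intro m hm
    have hA : wsumA (m : Int) = V m 0 := by
      rw [wsumA_eq]; simp
    have hB : blockLoop (((m : Int)).natAbs + 1) (m : Int) 0 = V m 0 := by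
      have : ((m : Int)).natAbs = m := Int.natAbs_natCast m
      rw [this, blockLoop_eq (m + 1) m 0 (by omega)]
      ring
    show (if wsumA (m : Int) = (m : Int) then wsumA (m : Int)
        else thirtGo f (wsumA (m : Int)) (wsumA (m : Int))) =
      (if blockLoop (((m : Int)).natAbs + 1) (m : Int) 0 = (m : Int)
        then blockLoop (((m : Int)).natAbs + 1) (m : Int) 0
        else altGo f (blockLoop (((m : Int)).natAbs + 1) (m : Int) 0))
    rw [hA, hB]
    by_cases hfix : V m 0 = (m : Int)
    · rw [if_pos hfix, if_pos hfix]
    · rw [if_neg hfix, if_neg hfix]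
      have hlt := V_ne_lt m hfix
      have hnn := V_nonneg m 0
      obtain ⟨w, hw⟩ : ∃ w : Nat, V m 0 = (w : Int) := ⟨(V m 0).toNat, by omega⟩
      rw [hw]
      exact ih w (by omega)

-- ===== VERDICT (by name: the statement is the Claim_ definition above) =====
theorem thirt_spec : Claim_equal_thirt := by
  intro n _ hpre
  unfold Pre_thirt at hpre
  unfold Spec_thirt thirt thirt_alt
  obtain ⟨m, rfl⟩ : ∃ m : Nat, n = (m : Int) := ⟨n.toNat, by omega⟩
  have hAbs : ((m : Int)).natAbs = m := Int.natAbs_natCast m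
  have hA : wsumA (m : Int) = V m 0 := by rw [wsumA_eq]; simp
  have hB : blockLoop (((m : Int)).natAbs + 1) (m : Int) 0 = V m 0 := by
    rw [hAbs, blockLoop_eq (m + 1) m 0 (by omega)]; ring
  rw [hAbs]
  show (if wsumA (m : Int) = (-1 : Int) then wsumA (m : Int)
      else thirtGo (m + 1) (wsumA (m : Int)) (wsumA (m : Int))) =
    (if blockLoop (((m : Int)).natAbs + 1) (m : Int) 0 = (m : Int)
      then blockLoop (((m : Int)).natAbs + 1) (m : Int) 0
      else altGo (m + 1) (blockLoop (((m : Int)).natAbs + 1) (m : Int) 0))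
  rw [hA, hB]
  have hnn := V_nonneg m 0
  rw [if_neg (by omega : ¬ V m 0 = (-1 : Int))]
  by_cases hfix : V m 0 = (m : Int)
  · rw [if_pos hfix, hfix]
    show (if wsumA (m : Int) = (m : Int) then wsumA (m : Int)
        else thirtGo m (wsumA (m : Int)) (wsumA (m : Int))) = (m : Int)
    rw [hA, if_pos hfix, hfix]
  · rw [if_neg hfix]
    have hlt := V_ne_lt m hfix
    obtain ⟨w, hw⟩ : ∃ w : Nat, V m 0 = (w : Int) := ⟨(V m 0).toNat, by omega⟩
    rw [hw]
    exact go_eq (m + 1) w (by omega)
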